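-- pv_equiv track=rewrite | github.com/kguzek/coursework-wust | js/lab2/calculate_proper_noun_percentage.py | contains_proper_noun
-- ===== SOURCE A (Python) =====
-- def contains_proper_noun(sentence: str) -> bool:
--     """
--     Check if the sentence contains at least one proper noun.
--     A proper noun is defined as a word starting with a capital letter,
--     not being the first word in the sentence.
--     Uses only string operations.
--     """
--     if not sentence:
--         return False
--
--     is_first_word = True
--     in_word = False
--     found_proper_noun = False
--
--     for char in sentence:
--         if char.isalpha():
--             if not in_word:
--                 # Start of a new word
--                 if not is_first_word and char.isupper():
--                     found_proper_noun = True
--                 is_first_word = False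
--                 in_word = True
--         else:
--             # Non-alphabetic character - end of word
--             in_word = False
--
--     return found_proper_noun
-- ===== SOURCE B (Python) =====
-- def contains_proper_noun(sentence: str) -> bool:
--     """Tokenize into maximal alphabetic runs, then check whether any
--     word other than the first starts with an uppercase letter."""
--     words = []
--     current = ""
--     for char in sentence:
--         if char.isalpha():
--             current += char
--         elif current:
--             words.append(current)
--             current = ""
--     if current:
--         words.append(current)
--     return any(word[0].isupper() for word in words[1:])
-- ===== Notes on version B (the rewrite author's own statement) =====
-- stated objective: simpler
-- what changed: Replaces A's three-flag character state machine with a tokenize-then-scan decomposition: build the list of maximal alphabetic runs in one pass, then return any(word[0].isupper() for word in words[1:]).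
import Mathlib
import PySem

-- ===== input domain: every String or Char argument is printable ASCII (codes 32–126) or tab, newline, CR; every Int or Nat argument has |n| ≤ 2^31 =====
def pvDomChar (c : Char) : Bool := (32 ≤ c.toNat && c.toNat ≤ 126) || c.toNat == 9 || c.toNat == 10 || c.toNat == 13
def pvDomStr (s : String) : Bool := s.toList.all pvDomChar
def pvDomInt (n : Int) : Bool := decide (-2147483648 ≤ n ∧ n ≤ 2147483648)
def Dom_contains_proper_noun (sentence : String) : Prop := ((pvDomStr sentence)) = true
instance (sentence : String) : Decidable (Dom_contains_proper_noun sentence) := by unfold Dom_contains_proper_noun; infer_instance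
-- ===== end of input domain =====

-- B replaces A's three-flag character state machine by a tokenize-then-scan decomposition (simpler); same O(n) cost.
-- Char.isAlpha / Char.isUpper are exact for Python's str.isalpha / str.isupper on the ASCII domain Dom_ admits.

-- ===== PORT A =====
-- state = (is_first_word, in_word, found_proper_noun); one step of A's character loop
def pvAStep (st : Bool × Bool × Bool) (c : Char) : Bool × Bool × Bool :=
  let (isFirstWord, inWord, found) := st
  if c.isAlpha then
    if !inWord then
      (false, true, found || (!isFirstWord && c.isUpper))
    else
      (isFirstWord, inWord, found)
  else
    (isFirstWord, false, found)

def contains_proper_noun (sentence : String) : Bool :=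
  if sentence.toList = [] then false
  else (sentence.toList.foldl pvAStep (true, false, false)).2.2

-- ===== PORT B =====
-- state = (words, current); one step of B's tokenizing loop
def pvBStep (st : List (List Char) × List Char) (c : Char) : List (List Char) × List Char :=
  let (words, current) := st
  if c.isAlpha then (words, current ++ [c])
  else if current ≠ [] then (words ++ [current], [])
  else (words, current)

-- word[0].isupper() in Source B is applied to the (always nonempty) collected runs; the [] branch is unreachable there.
def contains_proper_noun_alt (sentence : String) : Bool :=
  let acc := sentence.toList.foldl pvBStep ([], [])
  let words := if acc.2 ≠ [] then acc.1 ++ [acc.2] else acc.1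
  (words.drop 1).any (fun w => match w with | [] => false | c :: _ => c.isUpper)

-- ===== PRECONDITION & SPEC =====
def Spec_contains_proper_noun (sentence : String) (out : Bool) : Prop := out = contains_proper_noun_alt sentence
instance (sentence : String) (out : Bool) : Decidable (Spec_contains_proper_noun sentence out) := by unfold Spec_contains_proper_noun; infer_instance

-- ===== CLAIM (what is proved, stated in full; the proofs are below) =====
def Claim_equal_contains_proper_noun : Prop := ∀ (sentence : String), Dom_contains_proper_noun sentence → Spec_contains_proper_noun sentence (contains_proper_noun sentence)

-- ===== LEMMAS AND PROOFS =====

/-- First characters of the words of `l`, given whether we are currently inside a word. -/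
def pvStarts (inw : Bool) : List Char → List Char
  | [] => []
  | c :: cs =>
    if c.isAlpha then
      if inw then pvStarts true cs else c :: pvStarts true cs
    else pvStarts false cs

/-- The words (maximal alpha runs) of `l`, with `cur` the run collected so far. -/
def pvWords (cur : List Char) : List Char → List (List Char)
  | [] => if cur = [] then [] else [cur]
  | c :: cs =>
    if c.isAlpha then pvWords (cur ++ [c]) cs
    else if cur = [] then pvWords [] cs else cur :: pvWords [] cs

theorem aLoop_eq (l : List Char) : ∀ (first inw found : Bool),
    (l.foldl pvAStep (first, inw, found)).2.2
    = (found || ((if first then (pvStarts inw l).drop 1 else pvStarts inw l).any Char.isUpper)) := by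
  induction l with
  | nil => intro first inw found; simp [pvStarts]
  | cons c cs ih =>
    intro first inw found
    rw [List.foldl_cons]
    by_cases ha : c.isAlpha
    · cases inw with
      | true =>
        have hs : pvAStep (first, true, found) c = (first, true, found) := by
          simp [pvAStep, ha]
        rw [hs, ih, pvStarts]
        simp [ha]
      | false =>
        have hs : pvAStep (first, false, found) c
            = (false, true, found || (!first && c.isUpper)) := by
          simp [pvAStep, ha]
        rw [hs, ih, pvStarts]
        cases first <;> simp [ha, Bool.or_assoc]
    · have hs : pvAStep (first, inw, found) c = (first, false, found) := by
        simp [pvAStep, ha]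
      rw [hs, ih, pvStarts]
      simp [ha]

theorem bLoop_eq (l : List Char) : ∀ (words : List (List Char)) (cur : List Char),
    (if (l.foldl pvBStep (words, cur)).2 ≠ [] then
        (l.foldl pvBStep (words, cur)).1 ++ [(l.foldl pvBStep (words, cur)).2]
      else (l.foldl pvBStep (words, cur)).1)
    = words ++ pvWords cur l := by
  induction l with
  | nil =>
    intro words cur
    by_cases h : cur = [] <;> simp [pvWords, h]
  | cons c cs ih =>
    intro words cur
    rw [List.foldl_cons]
    by_cases ha : c.isAlpha
    · have hs : pvBStep (words, cur) c = (words, cur ++ [c]) := by simp [pvBStep, ha]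
      rw [hs, ih, pvWords]
      simp [ha]
    · by_cases hc : cur = []
      · have hs : pvBStep (words, cur) c = (words, cur) := by simp [pvBStep, ha, hc]
        rw [hs, hc, ih, pvWords]
        simp [ha]
      · have hs : pvBStep (words, cur) c = (words ++ [cur], []) := by simp [pvBStep, ha, hc]
        rw [hs, ih, pvWords]
        simp [ha, hc]

theorem words_heads (l : List Char) : ∀ (cur : List Char),
    (pvWords cur l).map (fun w => w.headD 'a')
    = (if cur = [] then pvStarts false l else cur.headD 'a' :: pvStarts true l) := by
  induction l with
  | nil => intro cur; by_cases h : cur = [] <;> simp [pvWords, pvStarts, h]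
  | cons c cs ih =>
    intro cur
    by_cases ha : c.isAlpha <;> by_cases hc : cur = []
    · subst hc
      rw [show pvWords [] (c :: cs) = pvWords [c] cs from by simp [pvWords, ha]]
      rw [ih [c], if_neg (by simp : ¬([c] : List Char) = []), if_pos rfl]
      rw [show pvStarts false (c :: cs) = c :: pvStarts true cs from by simp [pvStarts, ha]]
      rfl
    · have hne : cur ++ [c] ≠ [] := by simp
      rw [show pvWords cur (c :: cs) = pvWords (cur ++ [c]) cs from by simp [pvWords, ha]]
      rw [ih (cur ++ [c]), if_neg hne, if_neg hc]
      rw [show pvStarts true (c :: cs) = pvStarts true cs from by simp [pvStarts, ha]]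
      congr 1
      cases cur with
      | nil => exact absurd rfl hc
      | cons x xs => rfl
    · subst hc
      rw [show pvWords [] (c :: cs) = pvWords [] cs from by simp [pvWords, ha]]
      rw [ih [], if_pos rfl, if_pos rfl]
      rw [show pvStarts false (c :: cs) = pvStarts false cs from by simp [pvStarts, ha]]
    · rw [show pvWords cur (c :: cs) = cur :: pvWords [] cs from by simp [pvWords, ha, hc]]
      rw [List.map_cons, ih [], if_pos rfl, if_neg hc]
      rw [show pvStarts true (c :: cs) = pvStarts false cs from by simp [pvStarts, ha]]

theorem contains_proper_noun_spec : Claim_equal_contains_proper_noun := by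
  intro sentence _
  unfold Spec_contains_proper_noun
  simp only [contains_proper_noun, contains_proper_noun_alt]
  rw [bLoop_eq sentence.toList [] []]
  simp only [List.nil_append]
  have hmap := words_heads sentence.toList []
  rw [if_pos rfl] at hmap
  have hany : ((pvWords [] sentence.toList).drop 1).any
        (fun w => match w with | [] => false | c :: _ => c.isUpper)
      = ((pvStarts false sentence.toList).drop 1).any Char.isUpper := by
    rw [← hmap, ← List.map_drop, List.any_map]
    congr 1
    funext w
    cases w <;> rfl
  rw [hany]
  by_cases he : sentence.toList = []
  · simp [he, pvStarts]
  · rw [if_neg he, aLoop_eq sentence.toList true false false]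
    simp
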